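-- pv_equiv track=rewrite | github.com/ansible/ansible | lib/ansible/modules/network/ne/qos/ne_qos_ifcar.py | bitmap_to_vlan_list
-- ===== SOURCE A (Python) =====
-- def bitmap_to_vlan_list(bitmap):
--     """convert VLAN bitmap to VLAN list"""
--     tmp = list()
--     if not bitmap:
--         return tmp
--
--     bit_len = len(bitmap)
--     for i in range(bit_len):
--         if bitmap[i] == "0":
--             continue
--         bit = int(bitmap[i], 16)
--         if bit & 0x8:
--             tmp.append(str(i * 4))
--         if bit & 0x4:
--             tmp.append(str(i * 4 + 1))
--         if bit & 0x2:
--             tmp.append(str(i * 4 + 2))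
--         if bit & 0x1:
--             tmp.append(str(i * 4 + 3))
--
--     return tmp
-- ===== SOURCE B (Python) =====
-- def bitmap_to_vlan_list(bitmap):
--     """convert VLAN bitmap to VLAN list"""
--     bits = ''.join(format(int(c, 16), '04b') for c in bitmap)
--     return [str(i) for i, b in enumerate(bits) if b == '1']
-- ===== Notes on version B (the rewrite author's own statement) =====
-- stated objective: simpler
-- what changed: B expands the hex string into one flat binary bit-string (each char widened to its 4-bit MSB-first form) and collects the indices of set bits in a single enumerate/filter pass, instead of A's four explicit bit-mask branches with index-times-4-plus-offset arithmetic.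
import Mathlib
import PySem

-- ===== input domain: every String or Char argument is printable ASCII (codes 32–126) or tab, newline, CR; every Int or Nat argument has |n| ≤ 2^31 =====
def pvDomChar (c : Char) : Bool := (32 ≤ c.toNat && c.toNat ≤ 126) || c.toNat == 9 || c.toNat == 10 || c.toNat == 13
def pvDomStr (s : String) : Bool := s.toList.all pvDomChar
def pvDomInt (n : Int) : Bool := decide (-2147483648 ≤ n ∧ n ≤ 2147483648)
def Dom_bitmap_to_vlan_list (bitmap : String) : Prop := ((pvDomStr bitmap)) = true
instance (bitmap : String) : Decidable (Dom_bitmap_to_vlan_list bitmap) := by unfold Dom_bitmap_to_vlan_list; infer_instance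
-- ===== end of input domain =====

-- B replaces the four per-nibble mask branches by flattening the hex string to a binary bit-string and one enumerate/filter pass (objective: simpler).

-- ===== PORT A =====
-- int(c, 16) for a single hex digit; Python raises ValueError on a non-hex char — those inputs are excluded by Pre_ (this total helper returns 0 there)
def pvHexVal (c : Char) : Nat :=
  if '0' ≤ c ∧ c ≤ '9' then c.toNat - 48
  else if 'a' ≤ c ∧ c ≤ 'f' then c.toNat - 87
  else if 'A' ≤ c ∧ c ≤ 'F' then c.toNat - 55
  else 0

def bitmap_to_vlan_list (bitmap : String) : List String :=
  let tmp : List String := []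
  if bitmap.toList = [] then tmp
  else
    let bit_len : Nat := bitmap.toList.length
    (PySem.List.pyRange 0 (bit_len : Int) 1).foldl (fun tmp i =>
      if PySem.List.pyGetD bitmap.toList i ' ' = '0' then tmp
      else
        let bit := pvHexVal (PySem.List.pyGetD bitmap.toList i ' ')
        let tmp := if bit &&& 0x8 ≠ 0 then tmp ++ [PySem.Int.toStr (i * 4)] else tmp
        let tmp := if bit &&& 0x4 ≠ 0 then tmp ++ [PySem.Int.toStr (i * 4 + 1)] else tmp
        let tmp := if bit &&& 0x2 ≠ 0 then tmp ++ [PySem.Int.toStr (i * 4 + 2)] else tmp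
        if bit &&& 0x1 ≠ 0 then tmp ++ [PySem.Int.toStr (i * 4 + 3)] else tmp) tmp

-- ===== PORT B =====
-- format(n, '04b') — exact for 0 ≤ n < 16, which is pvHexVal's whole range
def pvBin4 (n : Nat) : List Char :=
  [if n &&& 0x8 ≠ 0 then '1' else '0',
   if n &&& 0x4 ≠ 0 then '1' else '0',
   if n &&& 0x2 ≠ 0 then '1' else '0',
   if n &&& 0x1 ≠ 0 then '1' else '0']

def bitmap_to_vlan_list_alt (bitmap : String) : List String :=
  let bits := bitmap.toList.flatMap (fun c => pvBin4 (pvHexVal c))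
  (PySem.List.enumerate bits).filterMap (fun p =>
    if p.2 = '1' then some (PySem.Int.toStr p.1) else none)

-- ===== PRECONDITION & SPEC =====
-- Pre_ excludes exactly the inputs containing a non-hex character, where A raises ValueError (int(c, 16)).
def pvIsHex (c : Char) : Bool :=
  ('0' ≤ c && c ≤ '9') || ('a' ≤ c && c ≤ 'f') || ('A' ≤ c && c ≤ 'F')
def Pre_bitmap_to_vlan_list (bitmap : String) : Prop :=
  bitmap.toList.all pvIsHex = true
instance (bitmap : String) : Decidable (Pre_bitmap_to_vlan_list bitmap) := by unfold Pre_bitmap_to_vlan_list; infer_instance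
def pvWitness_bitmap_to_vlan_list : String := "8"

def Spec_bitmap_to_vlan_list (bitmap : String) (out : List String) : Prop := out = bitmap_to_vlan_list_alt bitmap
instance (bitmap : String) (out : List String) : Decidable (Spec_bitmap_to_vlan_list bitmap out) := by unfold Spec_bitmap_to_vlan_list; infer_instance

-- ===== CLAIM (what is proved, stated in full; the proofs are below) =====
def Claim_equal_bitmap_to_vlan_list : Prop := ∀ (bitmap : String), Dom_bitmap_to_vlan_list bitmap → Pre_bitmap_to_vlan_list bitmap → Spec_bitmap_to_vlan_list bitmap (bitmap_to_vlan_list bitmap)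

-- ===== LEMMAS AND PROOFS =====

-- the per-character contribution both programs produce at character index i
def pvContrib (i : Int) (c : Char) : List String :=
  (if pvHexVal c &&& 0x8 ≠ 0 then [PySem.Int.toStr (i * 4)] else []) ++
  (if pvHexVal c &&& 0x4 ≠ 0 then [PySem.Int.toStr (i * 4 + 1)] else []) ++
  (if pvHexVal c &&& 0x2 ≠ 0 then [PySem.Int.toStr (i * 4 + 2)] else []) ++
  (if pvHexVal c &&& 0x1 ≠ 0 then [PySem.Int.toStr (i * 4 + 3)] else [])

theorem pvB_loop (cs : List Char) : ∀ (i0 : Int),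
    (PySem.List.enumerate (cs.flatMap (fun c => pvBin4 (pvHexVal c))) (4 * i0)).filterMap (fun p =>
      if p.2 = '1' then some (PySem.Int.toStr p.1) else none)
    = (PySem.List.enumerate cs i0).flatMap (fun p => pvContrib p.1 p.2) := by
  induction cs with
  | nil => intro i0; simp [PySem.List.enumerate]
  | cons c rest ih =>
    intro i0
    have h4 : 4 * i0 + 1 + 1 + 1 + 1 = 4 * (i0 + 1) := by ring
    simp only [List.flatMap_cons, pvBin4, List.cons_append, List.nil_append,
      PySem.List.enumerate_cons, List.filterMap_cons]
    by_cases h8 : pvHexVal c &&& 0x8 ≠ 0 <;>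
    by_cases h4' : pvHexVal c &&& 0x4 ≠ 0 <;>
    by_cases h2 : pvHexVal c &&& 0x2 ≠ 0 <;>
    by_cases h1 : pvHexVal c &&& 0x1 ≠ 0 <;>
      simp only [h8, h4', h2, h1, ite_not, Char.reduceEq, reduceIte] <;>
      (have ih' := ih (i0 + 1); simp only [pvBin4, ite_not] at ih'; rw [h4, ih']) <;>
      simp only [pvContrib, h8, h4', h2, h1, ite_not, reduceIte,
        List.cons_append, List.nil_append] <;>
      ring_nf

theorem pvContrib_zero (i : Int) : pvContrib i '0' = [] := by
  have h : pvHexVal '0' = 0 := by decide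
  simp [pvContrib, h]

theorem pvStep (acc : List String) (i : Int) (c : Char) :
    (if c = '0' then acc
     else
       let bit := pvHexVal c
       let tmp := if bit &&& 0x8 ≠ 0 then acc ++ [PySem.Int.toStr (i * 4)] else acc
       let tmp := if bit &&& 0x4 ≠ 0 then tmp ++ [PySem.Int.toStr (i * 4 + 1)] else tmp
       let tmp := if bit &&& 0x2 ≠ 0 then tmp ++ [PySem.Int.toStr (i * 4 + 2)] else tmp
       if bit &&& 0x1 ≠ 0 then tmp ++ [PySem.Int.toStr (i * 4 + 3)] else tmp)
    = acc ++ pvContrib i c := by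
  by_cases h0 : c = '0'
  · simp [h0, pvContrib_zero]
  · simp only [h0, if_false, pvContrib]
    split_ifs <;> simp [List.append_assoc]

theorem pvA_loop (xs : List Char) : ∀ (k n : Nat), n + k = xs.length → ∀ (acc : List String),
    (PySem.List.pyRange (n : Int) ((xs.length : Nat) : Int) 1).foldl (fun tmp i =>
      if PySem.List.pyGetD xs i ' ' = '0' then tmp
      else
        let bit := pvHexVal (PySem.List.pyGetD xs i ' ')
        let tmp := if bit &&& 0x8 ≠ 0 then tmp ++ [PySem.Int.toStr (i * 4)] else tmp
        let tmp := if bit &&& 0x4 ≠ 0 then tmp ++ [PySem.Int.toStr (i * 4 + 1)] else tmp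
        let tmp := if bit &&& 0x2 ≠ 0 then tmp ++ [PySem.Int.toStr (i * 4 + 2)] else tmp
        if bit &&& 0x1 ≠ 0 then tmp ++ [PySem.Int.toStr (i * 4 + 3)] else tmp) acc
    = acc ++ (PySem.List.enumerate (xs.drop n) (n : Int)).flatMap (fun p => pvContrib p.1 p.2) := by
  intro k
  induction k with
  | zero =>
    intro n hn acc
    rw [PySem.List.pyRange_one_eq_nil (by omega : ((xs.length : Nat) : Int) ≤ (n : Int))]
    rw [List.drop_of_length_le (by omega)]
    simp [PySem.List.enumerate]
  | succ k ih =>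
    intro n hn acc
    have hlt : n < xs.length := by omega
    rw [PySem.List.pyRange_one_cons (by exact_mod_cast hlt)]
    rw [List.foldl_cons]
    have hget : PySem.List.pyGetD xs (n : Int) ' ' = xs[n] := by
      rw [PySem.List.pyGetD_natCast, List.getD_eq_getElem?_getD, List.getElem?_eq_getElem hlt,
        Option.getD_some]
    rw [List.drop_eq_getElem_cons hlt, PySem.List.enumerate_cons, List.flatMap_cons]
    have hcast : ((n : Int) + 1) = (((n + 1 : Nat)) : Int) := by push_cast; ring
    rw [hcast]
    rw [ih (n + 1) (by omega) _]
    rw [hget, pvStep acc (n : Int) xs[n], List.append_assoc]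

-- ===== VERDICT (by name: the statement is the Claim_ definition above) =====
theorem bitmap_to_vlan_list_spec : Claim_equal_bitmap_to_vlan_list := by
  intro bitmap _ _
  unfold Spec_bitmap_to_vlan_list bitmap_to_vlan_list bitmap_to_vlan_list_alt
  have hB := pvB_loop bitmap.toList 0
  simp only [mul_zero] at hB
  rw [hB]
  by_cases h : bitmap.toList = []
  · simp [h]
  · simp only [h]
    have hA := pvA_loop bitmap.toList bitmap.toList.length 0 (by omega) []
    simpa using hA
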